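-- pv_equiv track=rewrite | github.com/7zrv/Algorithm | 프로그래머스/1/92334. 신고 결과 받기/신고 결과 받기.py | solution
-- ===== SOURCE A (Python) =====
-- def solution(id_list, report, k):
--     answer = []
--     id_dic = {}
--     result_dic = {}
--
--     for i in id_list:
--         id_dic[i] = 0
--
--     result_dic = id_dic.copy()
--     report = set(report)
--     report = list(report)
--
--     for i in range(len(report)):
--         report[i] = report[i].split(' ')
--
--     for i in report:
--         id_dic[i[1]] += 1
--
--     for i in report:
--         if id_dic[i[1]] >= k:
--             result_dic[i[0]] += 1
--
--     answer = list(result_dic.values())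
--
--     return answer
-- ===== SOURCE B (Python) =====
-- def solution(id_list, report, k):
--     pairs = [r.split(' ')[:2] for r in set(report)]
--     targets = [p[1] for p in pairs]
--     suspended = {t for t in targets if targets.count(t) >= k}
--     return [sum(1 for p in pairs if p[0] == i and p[1] in suspended) for i in id_list]
-- ===== Notes on version B (the rewrite author's own statement) =====
-- stated objective: simpler
-- what changed: Instead of mutating two parallel dicts over the deduplicated report list, B derives a 'suspended' set from plain list counts and builds the answer as a per-id comprehension counting each reporter's deduplicated reports against a suspended target, so no dict and no in-place increments remain.
-- outside the precondition, e.g. on solution(['a', 'a'], [], 1): A returns [0], B returns [0, 0]; on solution(['a'], ['b a'], 5): A returns [0], B returns [0]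
import Mathlib
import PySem

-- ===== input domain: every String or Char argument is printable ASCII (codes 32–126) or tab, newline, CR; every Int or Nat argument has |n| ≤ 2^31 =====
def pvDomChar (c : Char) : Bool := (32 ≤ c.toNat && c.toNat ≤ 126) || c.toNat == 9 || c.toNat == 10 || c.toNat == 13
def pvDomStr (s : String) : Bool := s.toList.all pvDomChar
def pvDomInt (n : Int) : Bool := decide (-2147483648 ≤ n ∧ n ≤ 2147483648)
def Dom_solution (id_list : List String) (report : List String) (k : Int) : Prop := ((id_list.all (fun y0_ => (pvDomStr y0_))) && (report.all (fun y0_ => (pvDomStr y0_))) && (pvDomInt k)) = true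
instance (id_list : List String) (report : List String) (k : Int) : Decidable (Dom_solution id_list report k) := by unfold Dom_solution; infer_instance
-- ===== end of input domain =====

-- B replaces A's two mutated dicts with a suspended-set derived from list counts and a
-- per-id counting comprehension (objective: simpler); equal return values on Pre_.

-- shared helper: Python's r.split(' ') — sep " " is nonempty so split? is always some
def pvSplit (r : String) : List String := (PySem.Str.split? r " ").getD []

-- ===== PORT A =====
def solution (id_list : List String) (report : List String) (k : Int) : List Int :=
  let id_dic0 : PySem.Dict String Int :=
    id_list.foldl (fun d i => d.insert i 0) PySem.Dict.empty
  let result_dic0 : PySem.Dict String Int := id_dic0          -- id_dic.copy()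
  let rep : List (List String) :=                             -- list(set(report)), then split each
    (PySem.Set.ofList report).map (fun r => pvSplit r)
  -- id_dic[i[1]] += 1   (exact where the key is present, which Pre_ guarantees)
  let id_dic :=
    rep.foldl (fun d i =>
      d.insert (PySem.List.pyGetD i 1 "") (d.getD (PySem.List.pyGetD i 1 "") 0 + 1)) id_dic0
  -- if id_dic[i[1]] >= k: result_dic[i[0]] += 1
  let result_dic :=
    rep.foldl (fun d i =>
      if k ≤ id_dic.getD (PySem.List.pyGetD i 1 "") 0 then
        d.insert (PySem.List.pyGetD i 0 "") (d.getD (PySem.List.pyGetD i 0 "") 0 + 1)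
      else d) result_dic0
  result_dic.values

-- ===== PORT B =====
def solution_alt (id_list : List String) (report : List String) (k : Int) : List Int :=
  let pairs : List (List String) :=                            -- [r.split(' ')[:2] for r in set(report)]
    (PySem.Set.ofList report).map (fun r => PySem.List.slice (pvSplit r) none (some 2))
  let targets : List String := pairs.map (fun p => PySem.List.pyGetD p 1 "")
  let suspended : PySem.Set String :=                          -- {t for t in targets if targets.count(t) >= k}
    PySem.Set.ofList (targets.filter (fun t => k ≤ (PySem.List.count targets t : Int)))
  id_list.map (fun i =>                                        -- sum(1 for p in pairs if …)
    pairs.foldl (fun acc p =>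
      if PySem.List.pyGetD p 0 "" = i ∧ PySem.Set.contains suspended (PySem.List.pyGetD p 1 "")
      then acc + 1 else acc) 0)

-- ===== PRECONDITION & SPEC =====
-- Pre_ excludes id_lists with duplicate ids (A's dict collapses them, so the output length is an
-- accident of dict reinsertion) and reports lacking a second space-token or naming ids outside
-- id_list (A raises IndexError/KeyError there, except for an unknown reporter whose target stays
-- below k, where A happens to return and both programs agree — see cites).
def Pre_solution (id_list : List String) (report : List String) (k : Int) : Prop :=
  id_list.Nodup ∧ ∀ r ∈ report,
    2 ≤ (pvSplit r).length ∧
    PySem.List.pyGetD (pvSplit r) 0 "" ∈ id_list ∧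
    PySem.List.pyGetD (pvSplit r) 1 "" ∈ id_list
instance (id_list : List String) (report : List String) (k : Int) : Decidable (Pre_solution id_list report k) := by unfold Pre_solution; infer_instance

def pvWitness_solution : List String × List String × Int :=
  (["muzi", "frodo", "apeach", "neo"],
   ["muzi frodo", "apeach frodo", "frodo neo", "muzi neo", "apeach muzi"], 2)

def Spec_solution (id_list : List String) (report : List String) (k : Int) (out : List Int) : Prop := out = solution_alt id_list report k
instance (id_list : List String) (report : List String) (k : Int) (out : List Int) : Decidable (Spec_solution id_list report k out) := by unfold Spec_solution; infer_instance

-- ===== CLAIM (what is proved, stated in full; the proofs are below) =====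
def Claim_equal_solution : Prop := ∀ (id_list : List String) (report : List String) (k : Int), Dom_solution id_list report k → Pre_solution id_list report k → Spec_solution id_list report k (solution id_list report k)

-- ===== LEMMAS AND PROOFS =====

-- indices 0 and 1 are unchanged by the [:2] slice
lemma pyGetD_slice2 (xs : List String) (j : Nat) (hj : j < 2) :
    PySem.List.pyGetD (PySem.List.slice xs none (some 2)) (j : Int) "" =
    PySem.List.pyGetD xs (j : Int) "" := by
  rw [PySem.List.slice_to xs (by norm_num)]
  simp only [PySem.List.pyGetD_natCast, List.getD, List.getElem?_take]
  simp [hj]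

-- the init dict maps everything to 0 (members by the inserted 0, non-members by the default)
lemma getD_init_zero (l : List String) (v : String) :
    (l.foldl (fun d i => d.insert i 0) (PySem.Dict.empty : PySem.Dict String Int)).getD v 0 = 0 := by
  suffices h : ∀ d : PySem.Dict String Int, d.getD v 0 = 0 →
      (l.foldl (fun d i => d.insert i 0) d).getD v 0 = 0 by
    exact h _ (by simp [PySem.Dict.getD_empty])
  induction l with
  | nil => intro d hd; simpa using hd
  | cons x t ih =>
    intro d hd
    refine ih _ ?_
    rw [PySem.Dict.getD_insert]
    split_ifs <;> simp [hd]

-- the conditional counting loop of A, as a getD characterisation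
lemma getD_cond_loop (cond : List String → Prop) [DecidablePred cond]
    (l : List (List String)) (d : PySem.Dict String Int) (v : String) :
    (l.foldl (fun d i =>
        if cond i then
          d.insert (PySem.List.pyGetD i 0 "") (d.getD (PySem.List.pyGetD i 0 "") 0 + 1)
        else d) d).getD v 0
      = d.getD v 0 + (l.countP (fun i => decide (PySem.List.pyGetD i 0 "" = v ∧ cond i)) : Int) := by
  induction l generalizing d with
  | nil => simp
  | cons p t ih =>
    simp only [List.foldl_cons, List.countP_cons]
    by_cases hc : cond p
    · rw [if_pos hc, ih]
      rw [PySem.Dict.getD_insert]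
      by_cases hv : PySem.List.pyGetD p 0 "" = v
      · simp [hv, hc]; ring
      · simp [hv, hc, Ne.symm hv]
    · rw [if_neg hc, ih]
      simp [hc]

-- keys are preserved by the conditional loop when every inserted key is already present
lemma keys_cond_loop (cond : List String → Prop) [DecidablePred cond]
    (l : List (List String)) (d : PySem.Dict String Int)
    (h : ∀ i ∈ l, PySem.List.pyGetD i 0 "" ∈ d.keys) :
    (l.foldl (fun d i =>
        if cond i then
          d.insert (PySem.List.pyGetD i 0 "") (d.getD (PySem.List.pyGetD i 0 "") 0 + 1)
        else d) d).keys = d.keys := by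
  induction l generalizing d with
  | nil => rfl
  | cons p t ih =>
    simp only [List.foldl_cons]
    by_cases hc : cond p
    · rw [if_pos hc]
      have hk : d.contains (PySem.List.pyGetD p 0 "") = true :=
        (PySem.Dict.contains_iff_mem_keys _ _).mpr (h p (List.mem_cons_self))
      have hkeys := PySem.Dict.keys_insert_of_contains d
        (v := d.getD (PySem.List.pyGetD p 0 "") 0 + 1) hk
      rw [ih _ (fun i hi => by rw [hkeys]; exact h i (List.mem_cons_of_mem _ hi)), hkeys]
    · rw [if_neg hc]
      exact ih _ (fun i hi => h i (List.mem_cons_of_mem _ hi))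

-- ===== VERDICT (by name: the statement is the Claim_ definition above) =====
theorem solution_spec : Claim_equal_solution := by
  intro id_list report k _ hpre
  obtain ⟨hnd, hrep⟩ := hpre
  unfold Spec_solution
  simp only [solution, solution_alt]
  set S := PySem.Set.ofList report with hS
  have hSmem : ∀ r ∈ S, r ∈ report := fun r hr => (PySem.Set.mem_ofList _ _).mp hr
  set rep : List (List String) := S.map (fun r => pvSplit r) with hrepdef
  set d0 := id_list.foldl (fun d i => d.insert i 0) (PySem.Dict.empty : PySem.Dict String Int)
    with hd0
  -- B's pairs list is rep with each element sliced to its first two tokens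
  have hpairsB : S.map (fun r => PySem.List.slice (pvSplit r) none (some 2))
      = rep.map (fun p => PySem.List.slice p none (some 2)) := by
    simp [hrepdef, List.map_map, Function.comp]
  simp only [hpairsB, List.map_map]
  -- B's targets list equals rep.map f1 (the [:2] slice keeps index 1)
  have htargets : rep.map ((fun p => PySem.List.pyGetD p 1 "") ∘
        (fun p => PySem.List.slice p none (some 2)))
      = rep.map (fun p => PySem.List.pyGetD p 1 "") := by
    exact List.map_congr_left (fun p _ => pyGetD_slice2 p 1 (by norm_num))
  simp only [htargets]
  set targets := rep.map (fun p => PySem.List.pyGetD p 1 "") with htg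
  -- A's id_dic lookups are counts in targets
  have hid_dic : ∀ v : String,
      (rep.foldl (fun d i =>
          d.insert (PySem.List.pyGetD i 1 "") (d.getD (PySem.List.pyGetD i 1 "") 0 + 1)) d0).getD v 0
        = (PySem.List.count targets v : Int) := by
    intro v
    have h := PySem.Dict.getD_foldl_insert_add_one targets d0 v
    rw [htg, List.foldl_map] at h
    rw [h, hd0, getD_init_zero, PySem.List.count_eq, htg]
    ring
  simp only [hid_dic]
  -- membership in B's suspended set ↔ A's threshold test, for elements of rep
  have hsusp : ∀ p ∈ rep,
      (PySem.Set.contains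
          (PySem.Set.ofList (targets.filter (fun t => k ≤ (PySem.List.count targets t : Int))))
          (PySem.List.pyGetD p 1 "") = true)
        ↔ k ≤ (PySem.List.count targets (PySem.List.pyGetD p 1 "") : Int) := by
    intro p hp
    rw [PySem.Set.contains_iff, PySem.Set.mem_ofList, List.mem_filter]
    constructor
    · rintro ⟨-, h⟩; simpa using h
    · intro h
      exact ⟨List.mem_map_of_mem hp, by simpa using h⟩
  -- keys of the init dict are id_list
  have hkeys0 : d0.keys = id_list := by
    rw [hd0, PySem.Dict.keys_foldl_insert id_list (fun _ _ => (0 : Int)) PySem.Dict.empty,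
      PySem.Dict.keys_empty, PySem.Set.update_nil_left, PySem.Set.ofList_eq_self_of_nodup _ hnd]
  -- every reporter id inserted by A's second loop is already a key
  have hkeysmem : ∀ i ∈ rep, PySem.List.pyGetD i 0 "" ∈ d0.keys := by
    intro i hi
    rw [hkeys0]
    obtain ⟨r, hr, rfl⟩ := List.mem_map.mp hi
    exact (hrep r (hSmem r hr)).2.1
  have hkeysfin := keys_cond_loop
    (fun i => k ≤ (PySem.List.count targets (PySem.List.pyGetD i 1 "") : Int)) rep d0 hkeysmem
  rw [PySem.Dict.values_eq_map_keys _ (by rw [hkeysfin, hkeys0]; exact hnd) 0, hkeysfin, hkeys0]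
  refine List.map_congr_left (fun v _ => ?_)
  rw [getD_cond_loop
      (fun i => k ≤ (PySem.List.count targets (PySem.List.pyGetD i 1 "") : Int)) rep d0 v,
    hd0, getD_init_zero, zero_add]
  rw [PySem.List.foldl_ite_add_one, zero_add]
  congr 1
  simp only [hrepdef, List.countP_map]
  refine List.countP_congr (fun r hrS => ?_)
  have hp : pvSplit r ∈ rep := by rw [hrepdef]; exact List.mem_map_of_mem hrS
  set p := pvSplit r with hpdef
  have e0 : PySem.List.pyGetD (PySem.List.slice p none (some 2)) 0 "" = PySem.List.pyGetD p 0 "" :=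
    pyGetD_slice2 p 0 (by norm_num)
  have e1 : PySem.List.pyGetD (PySem.List.slice p none (some 2)) 1 "" = PySem.List.pyGetD p 1 "" :=
    pyGetD_slice2 p 1 (by norm_num)
  simp only [Function.comp_apply, ← hpdef, e0, e1, decide_eq_true_eq]
  constructor
  · rintro ⟨ha, hb⟩; exact ⟨ha, (hsusp p hp).mpr hb⟩
  · rintro ⟨ha, hb⟩; exact ⟨ha, (hsusp p hp).mp hb⟩
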